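-- pv_equiv track=rewrite | github.com/ericosur/ericosur-snippet | prime/store/make_arrow.py | make_arrow
-- ===== SOURCE A (Python) =====
-- def _basic_check(lower, v, upper):
--     ''' perform basic check '''
--     if lower > upper or abs(upper - lower) < 2:
--         raise ValueError
--     if abs(lower-v) < 1 or abs(upper-v) < 1:
--         raise ValueError
--
-- def _get_fivestop(cnt, step):
--     ''' use _ to indicate five stop '''
--     if (cnt+1)%5 == 0:
--         return '_'
--     return step
--
-- def _get_middlesign(is_middle):
--     ''' return m if is_middle '''
--     if is_middle:
--         return 'm'
--     return '#'
--
-- def make_arrow(lower, v, upper):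
--     '''
--     generate indicator to show relationship between numbers
--     '''
--
--     _basic_check(lower, v, upper)
--
--     # special case
--     if upper - lower == 2:
--         return "[m]  (between twin primes)"
--
--     s = ''
--     max_len = 15    # better if it is odd number
--     step = '-'
--     d = abs(upper - lower)
--     is_middle = abs(upper - v) == abs(lower - v)
--     if d < max_len:
--         s = '['
--         cnt = 1
--         # left-hand-side
--         for _ in range(abs(v-lower-1)):
--             s += _get_fivestop(cnt, step)
--             cnt += 1
--
--         # the number v
--         s += _get_middlesign(is_middle)
--         cnt += 1
--
--         # right-hand-side
--         for _ in range(abs(v-upper)-1):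
--             s += _get_fivestop(cnt, step)
--             cnt += 1
--
--         s += ']'
--         return s
--
--     # make arrow by ratio
--     step = "."
--     r = int(abs(v-lower)/(upper-lower) * max_len)
--     for i in range(max_len):
--         if i == r:
--             s += _get_middlesign(is_middle)
--         else:
--             s += step
--     return s
-- ===== SOURCE B (Python) =====
-- def make_arrow(lower, v, upper):
--     '''
--     generate indicator to show relationship between numbers
--     (template-and-patch: allocate a base strip, then overwrite the
--     five-stop positions and finally the middle sign by index)
--     '''
--     if lower > upper or abs(upper - lower) < 2 or abs(lower - v) < 1 or abs(upper - v) < 1: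
--         raise ValueError
--
--     if upper - lower == 2:
--         return "[m]  (between twin primes)"
--
--     mid = 'm' if abs(upper - v) == abs(lower - v) else '#'
--
--     if abs(upper - lower) < 15:
--         left = abs(v - lower - 1)
--         n = left + 1 + (abs(v - upper) - 1)
--         body = ['-'] * n
--         for i in range(3, n, 5):   # cnt = i+1, '_' when (cnt+1) % 5 == 0
--             body[i] = '_'
--         body[left] = mid           # the middle sign wins over a five-stop
--         return '[' + ''.join(body) + ']'
--
--     r = int(abs(v - lower) / (upper - lower) * 15)
--     s = ['.'] * 15
--     if 0 <= r < 15: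
--         s[r] = mid
--     return ''.join(s)
-- ===== Notes on version B (the rewrite author's own statement) =====
-- stated objective: alternative
-- what changed: B does not generate characters sequentially at all: it allocates a constant template strip ('-'*n or '.'*15), then patches the five-stop positions via a strided index loop range(3,n,5) and finally overwrites the middle position by direct index assignment, instead of A's two sequential loops that decide each character from a shared mutable counter as it is appended.
import Mathlib
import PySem

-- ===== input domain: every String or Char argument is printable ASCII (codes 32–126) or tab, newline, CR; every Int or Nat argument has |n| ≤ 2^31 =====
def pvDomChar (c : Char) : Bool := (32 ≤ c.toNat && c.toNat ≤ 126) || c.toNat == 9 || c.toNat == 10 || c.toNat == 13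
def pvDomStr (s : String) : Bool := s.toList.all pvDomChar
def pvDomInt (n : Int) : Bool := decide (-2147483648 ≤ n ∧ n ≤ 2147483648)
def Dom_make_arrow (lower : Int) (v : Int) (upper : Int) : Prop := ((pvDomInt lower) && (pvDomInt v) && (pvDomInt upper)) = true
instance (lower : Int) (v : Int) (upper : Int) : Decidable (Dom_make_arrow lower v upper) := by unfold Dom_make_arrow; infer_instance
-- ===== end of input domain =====

-- B builds the strip by template-and-patch (allocate '-'*n / '.'*15, patch the five-stop
-- positions with a strided index loop, overwrite the middle by index) instead of A's
-- sequential character generation from a shared mutable counter; objective: alternative, same cost.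
-- Both Pythons compute the ratio r with float division `int(abs(v-lower)/(upper-lower)*15)`;
-- pvRatio15 below models that IEEE-754 double computation exactly with integer arithmetic
-- (round-to-nearest-even of a/b to 53 bits, exact *15, round again, truncate) and is shared
-- by both ports since the expression is literally the same in both sources.

-- round num/den to the nearest integer, ties to even (num, den > 0)
def pvRNE (num den : Nat) : Nat :=
  let q := num / den
  let r := num % den
  if den < 2*r then q+1 else if 2*r < den then q else if q % 2 == 0 then q else q+1

-- smallest s with tgt ≤ x * 2^s (fuel-bounded; fuel 100 suffices on the domain)
def pvShift : Nat → Nat → Nat → Nat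
  | 0, _, _ => 0
  | f+1, x, tgt => if tgt ≤ x then 0 else pvShift f (2*x) tgt + 1

-- exact model of Python's  int(a/b * 15)  for nonnegative int a, positive int b (CPython doubles)
def pvRatio15 (a b : Nat) : Nat :=
  if a == 0 then 0
  else
    let s := pvShift 100 a (b * 2^52)
    let m := pvRNE (a * 2^s) b          -- double(a/b) = m / 2^s
    let p := 15 * m
    let sh := (Nat.log2 p + 1) - 53     -- bit_length p - 53, truncated at 0
    let m2 := pvRNE p (2^sh)            -- double(15*(a/b)) = m2 * 2^sh / 2^s
    (m2 * 2^sh) / 2^s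

-- ===== PORT A =====
def pvFivestop (cnt : Int) (step : Char) : Char :=
  if PySem.Int.mod (cnt+1) 5 == 0 then '_' else step

def pvMiddlesign (is_middle : Bool) : Char :=
  if is_middle then 'm' else '#'

-- `for _ in range(k): s += _get_fivestop(cnt, '-'); cnt += 1`
def pvArrowLoop : Nat → Int → List Char → List Char × Int
  | 0, cnt, s => (s, cnt)
  | k+1, cnt, s => pvArrowLoop k (cnt+1) (s ++ [pvFivestop cnt '-'])

-- `for i in range(k): s += middlesign if i == r else '.'`
def pvRatioLoop : Nat → Int → Int → Bool → List Char → List Char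
  | 0, _, _, _, s => s
  | k+1, i, r, im, s => pvRatioLoop k (i+1) r im (s ++ [if i == r then pvMiddlesign im else '.'])

def make_arrow (lower : Int) (v : Int) (upper : Int) : String :=
  if lower > upper ∨ |upper - lower| < 2 then ""          -- ValueError: outside Pre_
  else if |lower - v| < 1 ∨ |upper - v| < 1 then ""       -- ValueError: outside Pre_
  else if upper - lower == 2 then "[m]  (between twin primes)"
  else
    let d := |upper - lower|
    let is_middle := |upper - v| == |lower - v|
    if d < 15 then
      let p1 := pvArrowLoop (v - lower - 1).natAbs 1 ['[']
      let s2 := p1.1 ++ [pvMiddlesign is_middle]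
      let p3 := pvArrowLoop ((v - upper).natAbs - 1) (p1.2 + 1) s2
      String.ofList (p3.1 ++ [']'])
    else
      let r : Int := (pvRatio15 (v - lower).natAbs (upper - lower).toNat : Nat)
      String.ofList (pvRatioLoop 15 0 r is_middle [])

-- ===== PORT B =====
-- `for i in range(3, n, 5): body[i] = '_'`  (indices are nonnegative, so .toNat is exact)
def pvPatchLoop : List Int → List Char → List Char
  | [], body => body
  | i :: rest, body => pvPatchLoop rest (body.set i.toNat '_')

def make_arrow_alt (lower : Int) (v : Int) (upper : Int) : String :=
  if lower > upper ∨ |upper - lower| < 2 ∨ |lower - v| < 1 ∨ |upper - v| < 1 then ""  -- ValueError: outside Pre_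
  else if upper - lower == 2 then "[m]  (between twin primes)"
  else
    let mid : Char := if |upper - v| == |lower - v| then 'm' else '#'
    if |upper - lower| < 15 then
      let L : Nat := (v - lower - 1).natAbs
      let n : Nat := L + 1 + ((v - upper).natAbs - 1)
      let body := pvPatchLoop (PySem.List.pyRange 3 (n : Int) 5) (List.replicate n '-')
      String.ofList ('[' :: (body.set L mid ++ [']']))
    else
      let r : Int := (pvRatio15 (v - lower).natAbs (upper - lower).toNat : Nat)
      let s := List.replicate 15 '.'
      String.ofList (if 0 ≤ r ∧ r < 15 then s.set r.toNat mid else s)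

-- ===== PRECONDITION & SPEC =====
-- Pre_ = exactly the inputs where Python's _basic_check does not raise ValueError
def Pre_make_arrow (lower : Int) (v : Int) (upper : Int) : Prop :=
  lower ≤ upper ∧ 2 ≤ upper - lower ∧ v ≠ lower ∧ v ≠ upper
instance (lower : Int) (v : Int) (upper : Int) : Decidable (Pre_make_arrow lower v upper) := by
  unfold Pre_make_arrow; infer_instance
def pvWitness_make_arrow : Int × Int × Int := (0, 5, 10)

def Spec_make_arrow (lower : Int) (v : Int) (upper : Int) (out : String) : Prop :=
  out = make_arrow_alt lower v upper
instance (lower : Int) (v : Int) (upper : Int) (out : String) : Decidable (Spec_make_arrow lower v upper out) := by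
  unfold Spec_make_arrow; infer_instance

-- ===== CLAIM (what is proved, stated in full; the proofs are below) =====
def Claim_equal_make_arrow : Prop := ∀ (lower : Int) (v : Int) (upper : Int),
  Dom_make_arrow lower v upper → Pre_make_arrow lower v upper →
  Spec_make_arrow lower v upper (make_arrow lower v upper)

-- ===== LEMMAS AND PROOFS =====

theorem pvArrowLoop_eq (k : Nat) : ∀ (c : Int) (s : List Char),
    pvArrowLoop k c s = (s ++ (List.range k).map (fun (j : Nat) => pvFivestop (c + (j:Int)) '-'), c + k) := by
  induction k with
  | zero => intro c s; simp [pvArrowLoop]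
  | succ k ih =>
    intro c s
    rw [pvArrowLoop, ih, List.range_succ_eq_map, List.map_cons, List.map_map]
    refine congrArg₂ Prod.mk ?_ (by push_cast; ring)
    simp only [List.append_assoc, List.singleton_append, Nat.cast_zero, add_zero]
    congr 1
    congr 1
    apply List.map_congr_left
    intro j _
    simp only [Function.comp_apply]
    congr 1
    push_cast
    ring

theorem pvRatioLoop_eq (k : Nat) : ∀ (i r : Int) (im : Bool) (s : List Char),
    pvRatioLoop k i r im s
      = s ++ (List.range k).map (fun (j : Nat) => if (i + (j:Int)) == r then pvMiddlesign im else '.') := by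
  induction k with
  | zero => intro i r im s; simp [pvRatioLoop]
  | succ k ih =>
    intro i r im s
    rw [pvRatioLoop, ih, List.range_succ_eq_map, List.map_cons, List.map_map]
    simp only [List.append_assoc, List.singleton_append, Nat.cast_zero, add_zero]
    congr 1
    congr 1
    apply List.map_congr_left
    intro j _
    simp only [Function.comp_apply]
    have : i + 1 + (j:Int) = i + ((j:Nat)+1 : Nat) := by push_cast; ring
    rw [this]

theorem pvSplit (L R : Nat) (f : Nat → Char) (c : Char) :
    (List.range (L+1+R)).map (fun k => if k = L then c else f k)
      = (List.range L).map f ++ c :: (List.range R).map (fun j => f (L+1+j)) := by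
  rw [List.range_add, List.map_append, List.map_map, List.range_succ, List.map_append]
  simp only [List.map_cons, List.map_nil, List.append_assoc, List.cons_append,
    List.nil_append]
  congr 1
  · refine List.map_congr_left (fun j hj => if_neg ?_)
    simp only [List.mem_range] at hj
    omega
  · congr 1
    refine List.map_congr_left (fun j _ => ?_)
    simp only [Function.comp_apply]
    rw [if_neg (by omega)]

theorem pvPatchLoop_length (idxs : List Int) : ∀ (body : List Char),
    (pvPatchLoop idxs body).length = body.length := by
  induction idxs with
  | nil => intro body; rfl
  | cons i rest ih => intro body; simp only [pvPatchLoop]; rw [ih, List.length_set]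

theorem pvPatchLoop_getElem (idxs : List Int) (hnn : ∀ i ∈ idxs, 0 ≤ i) :
    ∀ (body : List Char) (k : Nat) (hk : k < body.length),
    (pvPatchLoop idxs body)[k]'(by rw [pvPatchLoop_length]; exact hk)
      = if (k : Int) ∈ idxs then '_' else body[k] := by
  induction idxs with
  | nil => intro body k hk; simp [pvPatchLoop]
  | cons i rest ih =>
    intro body k hk
    have hi : 0 ≤ i := hnn i (List.mem_cons_self ..)
    simp only [pvPatchLoop]
    rw [ih (fun j hj => hnn j (List.mem_cons_of_mem _ hj)) _ k (by rw [List.length_set]; exact hk)]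
    by_cases hm : (k : Int) ∈ rest
    · rw [if_pos hm, if_pos (List.mem_cons_of_mem _ hm)]
    · rw [if_neg hm]
      rw [List.getElem_set]
      by_cases he : i.toNat = k
      · have : (k : Int) = i := by omega
        rw [if_pos he, if_pos (by rw [this]; exact List.mem_cons_self ..)]
      · rw [if_neg he, if_neg (by
          intro hc
          rcases List.mem_cons.mp hc with h | h
          · exact he (by omega)
          · exact hm h)]

-- B's patched strip, characterised as a comprehension
theorem pvPatched_eq (n : Nat) (L : Nat) (mid : Char) :
    (pvPatchLoop (PySem.List.pyRange 3 (n : Int) 5) (List.replicate n '-')).set L mid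
      = (List.range n).map (fun k => if k = L then mid else pvFivestop (1 + (k:Int)) '-') := by
  have hnn : ∀ i ∈ PySem.List.pyRange 3 (n : Int) 5, 0 ≤ i := by
    intro i hi
    have := (PySem.List.mem_pyRange_iff_of_pos (by norm_num) i).mp hi
    omega
  apply List.ext_getElem
  · rw [List.length_set, pvPatchLoop_length, List.length_replicate, List.length_map, List.length_range]
  · intro k h1 h2
    have hk : k < n := by
      simpa using h2
    rw [List.getElem_set, List.getElem_map, List.getElem_range]
    by_cases he : L = k
    · rw [if_pos he, if_pos he.symm]
    · rw [if_neg he, if_neg (fun hc => he hc.symm)]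
      rw [pvPatchLoop_getElem _ hnn _ k (by simpa using hk)]
      rw [List.getElem_replicate]
      have hmem : ((k:Int) ∈ PySem.List.pyRange 3 (n:Int) 5) ↔ (k % 5 = 3 ∧ k < n) := by
        rw [PySem.List.mem_pyRange_iff_of_pos (by norm_num)]
        omega
      have hm5 : ((PySem.Int.mod (1+(k:Int)+1) 5 == 0) = true) ↔ k % 5 = 3 := by
        have hmc : PySem.Int.mod (((k+2:Nat)) : Int) 5 = (((k+2) % 5 : Nat) : Int) := by
          exact_mod_cast PySem.Int.mod_natCast (k+2) 5
        rw [show (1+(k:Int)+1) = (((k+2:Nat)) : Int) by push_cast; ring, hmc]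
        simp only [beq_iff_eq, Nat.cast_eq_zero]
        omega
      unfold pvFivestop
      by_cases h5 : k % 5 = 3
      · rw [if_pos (hmem.mpr ⟨h5, hk⟩), if_pos (hm5.mpr h5)]
      · rw [if_neg (fun hc => h5 (hmem.mp hc).1), if_neg (fun hc => h5 (hm5.mp hc))]

theorem pvRatioSet (r : Int) (mid : Char) :
    (List.range 15).map (fun (j:Nat) => if ((0:Int)+(j:Int)) == r then mid else '.')
      = if 0 ≤ r ∧ r < 15 then (List.replicate 15 '.').set r.toNat mid else List.replicate 15 '.' := by
  split_ifs with h
  · apply List.ext_getElem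
    · simp
    · intro k h1 h2
      have hk : k < 15 := by simpa using h1
      rw [List.getElem_map, List.getElem_range, List.getElem_set, List.getElem_replicate]
      by_cases he : r.toNat = k
      · rw [if_pos he, if_pos (by simp only [beq_iff_eq]; omega)]
      · rw [if_neg he, if_neg (by simp only [beq_iff_eq]; omega)]
  · apply List.ext_getElem
    · simp
    · intro k h1 h2
      have hk : k < 15 := by simpa using h1
      rw [List.getElem_map, List.getElem_range, List.getElem_replicate,
        if_neg (by simp only [beq_iff_eq]; omega)]

-- ===== VERDICT (by name: the statement is the Claim_ definition above) =====
theorem make_arrow_spec : Claim_equal_make_arrow := by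
  intro lower v upper _hdom hpre
  obtain ⟨h1, h2, h3, h4⟩ := hpre
  have hd : |upper - lower| = upper - lower := abs_of_nonneg (by omega)
  have hlv : 1 ≤ |lower - v| := Int.one_le_abs (by omega)
  have huv : 1 ≤ |upper - v| := Int.one_le_abs (by omega)
  have gA1 : ¬(lower > upper ∨ |upper - lower| < 2) := by
    rw [not_or]; exact ⟨by omega, by omega⟩
  have gA2 : ¬(|lower - v| < 1 ∨ |upper - v| < 1) := by
    rw [not_or]; exact ⟨by omega, by omega⟩
  have gB : ¬(lower > upper ∨ |upper - lower| < 2 ∨ |lower - v| < 1 ∨ |upper - v| < 1) := by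
    rw [not_or, not_or, not_or]; exact ⟨by omega, by omega, by omega, by omega⟩
  unfold Spec_make_arrow make_arrow make_arrow_alt
  rw [if_neg gA1, if_neg gA2, if_neg gB]
  by_cases htwin : (upper - lower == 2) = true
  · rw [if_pos htwin, if_pos htwin]
  · rw [if_neg htwin, if_neg htwin]
    by_cases hsmall : |upper - lower| < 15
    · simp only [if_pos hsmall, pvArrowLoop_eq]
      set L : Nat := (v - lower - 1).natAbs with hLdef
      set R : Nat := (v - upper).natAbs - 1 with hRdef
      rw [pvPatched_eq (L + 1 + R) L
            (if (|upper - v| == |lower - v|) = true then 'm' else '#'),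
          pvSplit L R (fun k => pvFivestop (1 + (k:Int)) '-')]
      simp only [pvMiddlesign]
      simp only [List.append_assoc, List.cons_append, List.nil_append]
      congr 1
      congr 2
      congr 1
      congr 1
      apply List.map_congr_left
      intro j _
      congr 1
      push_cast
      ring
    · simp only [if_neg hsmall, pvRatioLoop_eq, List.nil_append]
      rw [pvRatioSet]
      simp only [pvMiddlesign]
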